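-- pv_equiv track=rewrite | github.com/lucasdeosantos/faculdade | periodo6/criptografia/t1/trap/_encrypt.py | _add_pad_char
-- ===== SOURCE A (Python) =====
-- def _add_pad_char(text, pad_char='X'):
--     processed_chars = []
--
--     i = 0
--     while i < len(text):
--         current_char = text[i]
--         processed_chars.append(current_char)
--
--         if i + 1 < len(text):
--             next_char = text[i+1]
--
--             if current_char == next_char:
--                 processed_chars.append(pad_char)
--                 i += 1
--             else:
--                 processed_chars.append(next_char)
--                 i += 2
--         else:
--             i += 1
--
--     if len(processed_chars) % 2 != 0:
--         processed_chars.append(pad_char)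
--
--     return ''.join(processed_chars)
-- ===== SOURCE B (Python) =====
-- def _add_pad_char(text, pad_char='X'):
--     out = []
--     prev = None
--     for c in text:
--         if prev is None:
--             out.append(c)
--             prev = c
--         elif c == prev:
--             out.append(pad_char)
--             out.append(c)
--             prev = c
--         else:
--             out.append(c)
--             prev = None
--     if len(out) % 2 != 0:
--         out.append(pad_char)
--     return ''.join(out)
-- ===== Notes on version B (the rewrite author's own statement) =====
-- stated objective: simpler
-- what changed: Replaces the variable-step index loop with i+1 lookahead by a single forward for-loop over the characters carrying the previous digram-start char as state, removing all index arithmetic.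
import Mathlib
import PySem

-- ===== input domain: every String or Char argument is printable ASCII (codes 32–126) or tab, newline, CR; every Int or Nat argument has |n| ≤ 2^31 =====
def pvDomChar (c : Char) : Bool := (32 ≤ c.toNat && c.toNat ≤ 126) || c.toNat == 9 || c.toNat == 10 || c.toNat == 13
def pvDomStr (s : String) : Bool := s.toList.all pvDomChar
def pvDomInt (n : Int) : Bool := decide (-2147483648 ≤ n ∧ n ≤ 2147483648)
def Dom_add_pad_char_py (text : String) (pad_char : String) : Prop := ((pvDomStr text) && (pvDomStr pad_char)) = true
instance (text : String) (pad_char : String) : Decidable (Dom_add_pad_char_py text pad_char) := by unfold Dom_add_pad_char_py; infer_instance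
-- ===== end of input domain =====

-- B replaces A's variable-step index loop (with i+1 lookahead and i+=1/i+=2 arithmetic)
-- by a single forward fold carrying the current digram-start char as state (objective: simpler).

-- ===== PORT A =====
-- while i < len(text): append text[i]; lookahead text[i+1]; i += 1 or 2
def pvALoop (pad : String) (cs : List Char) (i : Nat) (acc : List String) : List String :=
  if h : i < cs.length then
    let acc1 := acc ++ [String.ofList [cs[i]]]
    if h2 : i + 1 < cs.length then
      if cs[i] = cs[i+1] then pvALoop pad cs (i+1) (acc1 ++ [pad])
      else pvALoop pad cs (i+2) (acc1 ++ [String.ofList [cs[i+1]]])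
    else pvALoop pad cs (i+1) acc1
  else acc
termination_by cs.length - i

def add_pad_char_py (text : String) (pad_char : String) : String :=
  let l := pvALoop pad_char text.toList 0 []
  let l := if l.length % 2 ≠ 0 then l ++ [pad_char] else l
  PySem.Str.join "" l

-- ===== PORT B =====
-- one step of B's for-loop: state = (collected pieces, current digram-start char or none)
def pvBStep (pad : String) (st : List String × Option Char) (c : Char) : List String × Option Char :=
  match st.2 with
  | none => (st.1 ++ [String.ofList [c]], some c)
  | some p => if c = p then (st.1 ++ [pad, String.ofList [c]], some c)
              else (st.1 ++ [String.ofList [c]], none)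

def add_pad_char_py_alt (text : String) (pad_char : String) : String :=
  let l := (text.toList.foldl (pvBStep pad_char) ([], none)).1
  let l := if l.length % 2 ≠ 0 then l ++ [pad_char] else l
  PySem.Str.join "" l

-- ===== PRECONDITION & SPEC =====
def Spec_add_pad_char_py (text : String) (pad_char : String) (out : String) : Prop := out = add_pad_char_py_alt text pad_char
instance (text : String) (pad_char : String) (out : String) : Decidable (Spec_add_pad_char_py text pad_char out) := by unfold Spec_add_pad_char_py; infer_instance

-- ===== CLAIM (what is proved, stated in full; the proofs are below) =====
def Claim_equal_add_pad_char_py : Prop := ∀ (text : String) (pad_char : String), Dom_add_pad_char_py text pad_char → Spec_add_pad_char_py text pad_char (add_pad_char_py text pad_char)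

-- ===== LEMMAS AND PROOFS =====

-- digram-structured restatement of A's loop (recursion on the remaining characters)
def pvAList (pad : String) : List Char → List String → List String
  | [], acc => acc
  | [c], acc => acc ++ [String.ofList [c]]
  | c :: d :: t, acc =>
    if c = d then pvAList pad (d :: t) (acc ++ [String.ofList [c], pad])
    else pvAList pad t (acc ++ [String.ofList [c], String.ofList [d]])

lemma pvALoop_eq_aList (pad : String) :
    ∀ (n : Nat) (cs : List Char) (i : Nat) (acc : List String), cs.length - i ≤ n →
      pvALoop pad cs i acc = pvAList pad (cs.drop i) acc := by
  intro n
  induction n with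
  | zero =>
    intro cs i acc h
    have hi : ¬ i < cs.length := by omega
    rw [pvALoop, dif_neg hi, List.drop_eq_nil_of_le (by omega), pvAList]
  | succ n ih =>
    intro cs i acc h
    by_cases h1 : i < cs.length
    · rw [pvALoop, dif_pos h1, List.drop_eq_getElem_cons h1]
      by_cases h2 : i + 1 < cs.length
      · rw [List.drop_eq_getElem_cons h2]
        by_cases h3 : cs[i] = cs[i+1]
        · simp only [dif_pos h2, pvAList, h3]
          rw [ih cs (i+1) _ (by omega), List.drop_eq_getElem_cons h2]
          simp
        · simp only [dif_pos h2, pvAList, if_neg h3]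
          rw [ih cs (i+2) _ (by omega)]
          simp
      · have hd : cs.drop (i+1) = [] := List.drop_eq_nil_of_le (by omega)
        rw [dif_neg h2, ih cs (i+1) _ (by omega), hd, pvAList, pvAList]
    · rw [pvALoop, dif_neg h1, List.drop_eq_nil_of_le (by omega), pvAList]

lemma pvAList_eq_fold (pad : String) :
    ∀ (n : Nat),
      (∀ (l : List Char) (acc : List String), l.length ≤ n →
        pvAList pad l acc = (l.foldl (pvBStep pad) (acc, none)).1) ∧
      (∀ (t : List Char) (d : Char) (acc : List String), t.length ≤ n →
        pvAList pad (d :: t) acc = (t.foldl (pvBStep pad) (acc ++ [String.ofList [d]], some d)).1) := by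
  intro n
  induction n with
  | zero =>
    constructor
    · intro l acc h
      have : l = [] := List.eq_nil_of_length_eq_zero (by omega)
      subst this; rfl
    · intro t d acc h
      have : t = [] := List.eq_nil_of_length_eq_zero (by omega)
      subst this; rfl
  | succ n ih =>
    obtain ⟨Fn, Gn⟩ := ih
    have Gs : ∀ (t : List Char) (d : Char) (acc : List String), t.length ≤ n + 1 →
        pvAList pad (d :: t) acc = (t.foldl (pvBStep pad) (acc ++ [String.ofList [d]], some d)).1 := by
      intro t d acc h
      match t with
      | [] => rfl
      | e :: t' =>
        by_cases h3 : d = e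
        · subst h3
          rw [pvAList, if_pos rfl, List.foldl_cons,
            Gn t' d (acc ++ [String.ofList [d], pad]) (by simp at h; omega)]
          simp [pvBStep]
        · have h3' : ¬ e = d := fun he => h3 he.symm
          rw [pvAList, if_neg h3, List.foldl_cons,
            Fn t' (acc ++ [String.ofList [d], String.ofList [e]]) (by simp at h; omega)]
          simp [pvBStep, h3']
    refine ⟨?_, Gs⟩
    intro l acc h
    match l with
    | [] => rfl
    | c :: t =>
      rw [List.foldl_cons]
      exact Gs t c acc (by simp at h; omega)

-- ===== VERDICT (by name: the statement is the Claim_ definition above) =====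
theorem add_pad_char_py_spec : Claim_equal_add_pad_char_py := by
  intro text pad_char _
  unfold Spec_add_pad_char_py add_pad_char_py add_pad_char_py_alt
  rw [pvALoop_eq_aList pad_char text.toList.length text.toList 0 [] (by omega), List.drop_zero,
    (pvAList_eq_fold pad_char text.toList.length).1 text.toList [] le_rfl]
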